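-- pv_equiv track=rewrite | github.com/haitovs/yt-meme-bot | uploader.py | _limit_tags
-- ===== SOURCE A (Python) =====
-- from typing import Any, Dict, List, Tuple
--
-- def _limit_tags(tags: List[str]) -> List[str]:
--     # YouTube tags limit ~500 chars
--     out = []
--     total = 0
--     for t in tags:
--         add = len(t) + (1 if out else 0)
--         if total + add > 490:
--             break
--         out.append(t)
--         total += add
--     return out
-- ===== SOURCE B (Python) =====
-- def _limit_tags(tags):
--     # prefix-sum table + count of feasible prefixes, then one slice
--     if not tags:
--         return []
--     costs = [len(tags[0])] + [len(t) + 1 for t in tags[1:]]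
--     prefix = []
--     run = 0
--     for c in costs:
--         run += c
--         prefix.append(run)
--     k = sum(1 for p in prefix if p <= 490)
--     return tags[:k]
-- ===== Notes on version B (the rewrite author's own statement) =====
-- stated objective: alternative
-- what changed: Replaces A's single greedy scan with a running accumulator and break by a build-then-select shape: B first materialises the per-tag cost table and its prefix sums, then (using that the prefix sums are nondecreasing) counts how many prefix totals stay within 490 and returns that slice of tags.
import Mathlib
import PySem

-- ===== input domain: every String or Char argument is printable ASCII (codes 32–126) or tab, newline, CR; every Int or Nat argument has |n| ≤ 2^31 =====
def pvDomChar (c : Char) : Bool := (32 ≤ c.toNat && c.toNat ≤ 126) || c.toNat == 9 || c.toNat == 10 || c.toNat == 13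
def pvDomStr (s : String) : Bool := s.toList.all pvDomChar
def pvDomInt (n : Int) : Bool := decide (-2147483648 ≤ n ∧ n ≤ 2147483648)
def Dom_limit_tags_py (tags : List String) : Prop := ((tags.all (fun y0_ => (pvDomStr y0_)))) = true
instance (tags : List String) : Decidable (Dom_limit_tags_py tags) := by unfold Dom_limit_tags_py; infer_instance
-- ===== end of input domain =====

-- B replaces A's greedy scan-with-break by a cost table + prefix sums + count-then-slice decomposition (alternative shape, same cost).

-- ===== PORT A =====
-- the for-loop of _limit_tags: state (out, total), break returns out
def limitLoop : List String → List String → Int → List String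
  | [], out, _ => out
  | t :: ts, out, total =>
    let add : Int := PySem.Str.len t + (if out.isEmpty then 0 else 1)
    if total + add > 490 then out
    else limitLoop ts (out ++ [t]) (total + add)

def limit_tags_py (tags : List String) : List String := limitLoop tags [] 0

-- ===== PORT B =====
-- costs = [len(tags[0])] + [len(t)+1 for t in tags[1:]]  (empty list → [])
def altCosts (tags : List String) : List Int :=
  match tags with
  | [] => []
  | t :: rest => PySem.Str.len t :: rest.map (fun s => PySem.Str.len s + 1)

-- the prefix-sum building loop of Source B: state (prefix, run)
def altPrefix (costs : List Int) : List Int :=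
  (costs.foldl (fun (st : List Int × Int) c => (st.1 ++ [st.2 + c], st.2 + c)) ([], 0)).1

-- k = sum(1 for p in prefix if p <= 490); tags[:k] with k ≥ 0 is take k
def limit_tags_py_alt (tags : List String) : List String :=
  let pre := altPrefix (altCosts tags)
  let k := pre.countP (fun p => decide (p ≤ 490))
  tags.take k

-- ===== PRECONDITION & SPEC =====
def Spec_limit_tags_py (tags : List String) (out : List String) : Prop := out = limit_tags_py_alt tags
instance (tags : List String) (out : List String) : Decidable (Spec_limit_tags_py tags out) := by unfold Spec_limit_tags_py; infer_instance

-- ===== CLAIM (what is proved, stated in full; the proofs are below) =====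
def Claim_equal_limit_tags_py : Prop := ∀ (tags : List String), Dom_limit_tags_py tags → Spec_limit_tags_py tags (limit_tags_py tags)

-- ===== LEMMAS AND PROOFS =====

-- mathematical prefix sums starting from s
def pfx : Int → List Int → List Int
  | _, [] => []
  | s, c :: cs => (s + c) :: pfx (s + c) cs

-- greedy count: how many leading costs fit under 490 starting from total
def greedy : Int → List Int → Nat
  | _, [] => 0
  | total, c :: cs => if total + c > 490 then 0 else 1 + greedy (total + c) cs

theorem altPrefix_foldl (cs : List Int) (acc : List Int) (s : Int) :
    (cs.foldl (fun (st : List Int × Int) c => (st.1 ++ [st.2 + c], st.2 + c)) (acc, s)).1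
      = acc ++ pfx s cs := by
  induction cs generalizing acc s with
  | nil => simp [pfx]
  | cons c cs ih => simp [List.foldl, pfx, ih]

theorem altPrefix_eq (cs : List Int) : altPrefix cs = pfx 0 cs := by
  simpa using altPrefix_foldl cs [] 0

theorem mem_pfx_ge (cs : List Int) (s : Int) (h : ∀ c ∈ cs, 0 ≤ c) :
    ∀ x ∈ pfx s cs, s ≤ x := by
  induction cs generalizing s with
  | nil => simp [pfx]
  | cons c cs ih =>
    intro x hx
    have hc : 0 ≤ c := h c (by simp)
    rcases (by simpa [pfx] using hx : x = s + c ∨ x ∈ pfx (s + c) cs) with h1 | h1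
    · omega
    · have := ih (s + c) (fun d hd => h d (by simp [hd])) x h1
      omega

theorem countP_pfx (cs : List Int) (s : Int) (h : ∀ c ∈ cs, 0 ≤ c) :
    (pfx s cs).countP (fun p => decide (p ≤ 490)) = greedy s cs := by
  induction cs generalizing s with
  | nil => simp [pfx, greedy]
  | cons c cs ih =>
    by_cases hb : s + c > 490
    · have hz : (pfx (s + c) cs).countP (fun p => decide (p ≤ 490)) = 0 := by
        rw [List.countP_eq_zero]
        intro x hx
        have := mem_pfx_ge cs (s + c) (fun d hd => h d (by simp [hd])) x hx
        simp only [decide_eq_true_eq]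
        omega
      have hle : ¬ (s + c ≤ 490) := by omega
      simp only [pfx, greedy, List.countP_cons, hz, if_pos hb]
      simp [hle]
    · have hrec := ih (s + c) (fun d hd => h d (by simp [hd]))
      have hle : s + c ≤ 490 := by omega
      simp only [pfx, greedy, List.countP_cons, hrec, if_neg hb]
      simp [hle]
      omega

theorem len_nonneg (s : String) : 0 ≤ PySem.Str.len s := by
  simp [PySem.Str.len_eq]

theorem altCosts_nonneg (tags : List String) : ∀ c ∈ altCosts tags, 0 ≤ c := by
  cases tags with
  | nil => simp [altCosts]
  | cons t rest =>
    intro c hc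
    rcases (by simpa [altCosts] using hc :
        c = PySem.Str.len t ∨ ∃ s ∈ rest, PySem.Str.len s + 1 = c) with h1 | ⟨s, _, h1⟩
    · exact h1 ▸ len_nonneg t
    · have := len_nonneg s; omega

theorem limitLoop_nonempty (ts : List String) (out : List String) (total : Int) (h : out ≠ []) :
    limitLoop ts out total
      = out ++ ts.take (greedy total (ts.map (fun s => PySem.Str.len s + 1))) := by
  induction ts generalizing out total with
  | nil => simp [limitLoop, greedy]
  | cons t ts ih =>
    have hne : out.isEmpty = false := by simpa [List.isEmpty_iff] using h
    simp only [limitLoop, hne, Bool.false_eq_true, if_false, List.map_cons, greedy]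
    by_cases hb : total + (PySem.Str.len t + 1) > 490
    · rw [if_pos hb, if_pos hb]
      simp
    · rw [if_neg hb, if_neg hb, ih (out ++ [t]) (total + (PySem.Str.len t + 1)) (by simp),
        Nat.add_comm 1, List.take_succ_cons, List.append_assoc, List.singleton_append]

theorem limit_tags_eq_greedy (tags : List String) :
    limit_tags_py tags = tags.take (greedy 0 (altCosts tags)) := by
  cases tags with
  | nil => simp [limit_tags_py, limitLoop, altCosts, greedy]
  | cons t rest =>
    simp only [limit_tags_py, limitLoop, altCosts, List.isEmpty_nil, if_true, greedy]
    by_cases hb : (0 : Int) + (PySem.Str.len t + 0) > 490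
    · have hb2 : (0 : Int) + PySem.Str.len t > 490 := by omega
      rw [if_pos hb, if_pos hb2]
      simp
    · have hb2 : ¬ ((0 : Int) + PySem.Str.len t > 490) := by omega
      rw [if_neg hb, if_neg hb2, List.nil_append,
        limitLoop_nonempty rest [t] ((0 : Int) + (PySem.Str.len t + 0)) (by simp)]
      have harg : (0 : Int) + (PySem.Str.len t + 0) = 0 + PySem.Str.len t := by ring
      rw [harg, Nat.add_comm 1, List.take_succ_cons, List.singleton_append]

-- ===== VERDICT (by name: the statement is the Claim_ definition above) =====
theorem limit_tags_py_spec : Claim_equal_limit_tags_py := by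
  intro tags _
  show limit_tags_py tags = limit_tags_py_alt tags
  simp only [limit_tags_py_alt]
  rw [altPrefix_eq, countP_pfx _ _ (altCosts_nonneg tags), limit_tags_eq_greedy]
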